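-- pv_equiv track=rewrite | github.com/Varkot-dev/videomaking | manimgen/planner/cue_parser.py | inject_cues
-- ===== SOURCE A (Python) =====
-- def inject_cues(clean_text: str, cue_word_indices: list[int]) -> str:
--     """Inverse of parse_cues — rebuild narration with [CUE] tags inserted.
--
--     Useful for displaying the authored script in the editor UI.
--     Index 0 is always the implicit start and is NOT re-inserted as a tag.
--     """
--     words = clean_text.split()
--     cue_set = set(cue_word_indices) - {0}
--     result: list[str] = []
--     for i, word in enumerate(words):
--         if i in cue_set:
--             result.append("[CUE]")
--         result.append(word)
--     return " ".join(result)
-- ===== SOURCE B (Python) =====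
-- def inject_cues(clean_text: str, cue_word_indices: list[int]) -> str:
--     words = clean_text.split()
--     cues = sorted(i for i in set(cue_word_indices) if 0 < i < len(words))
--     parts = []
--     prev = 0
--     for idx in cues:
--         parts.extend(words[prev:idx])
--         parts.append("[CUE]")
--         prev = idx
--     parts.extend(words[prev:])
--     return " ".join(parts)
-- ===== Notes on version B (the rewrite author's own statement) =====
-- stated objective: alternative
-- what changed: Instead of scanning every word with a set-membership test, B sorts the deduplicated in-range cue indices and walks them as cut points, splicing whole word segments between consecutive cues.
import Mathlib
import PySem

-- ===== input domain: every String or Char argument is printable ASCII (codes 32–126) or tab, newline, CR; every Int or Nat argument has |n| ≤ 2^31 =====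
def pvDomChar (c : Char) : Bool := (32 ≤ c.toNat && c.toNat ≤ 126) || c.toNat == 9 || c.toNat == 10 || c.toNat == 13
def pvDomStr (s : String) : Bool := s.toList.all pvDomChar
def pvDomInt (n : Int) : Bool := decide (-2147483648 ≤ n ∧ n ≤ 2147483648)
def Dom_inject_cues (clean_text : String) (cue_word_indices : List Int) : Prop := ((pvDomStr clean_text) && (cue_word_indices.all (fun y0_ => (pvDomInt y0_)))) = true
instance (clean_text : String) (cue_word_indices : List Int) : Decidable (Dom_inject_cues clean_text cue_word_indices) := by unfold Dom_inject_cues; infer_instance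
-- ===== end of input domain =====

-- B rebuilds the text by walking the sorted in-range cue indices as cut points and splicing
-- whole word segments, instead of A's per-word membership test (objective: alternative).

-- ===== PORT A =====
def inject_cues (clean_text : String) (cue_word_indices : List Int) : String :=
  let words := PySem.Str.split₀ clean_text
  let cue_set := (PySem.Set.ofList cue_word_indices).diff (PySem.Set.ofList [0])
  let result := (PySem.List.enumerate words).foldl
    (fun acc iw =>
      (if cue_set.contains iw.1 then acc ++ ["[CUE]"] else acc) ++ [iw.2]) ([] : List String)
  PySem.Str.join " " result

-- ===== PORT B =====
def inject_cues_alt (clean_text : String) (cue_word_indices : List Int) : String :=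
  let words := PySem.Str.split₀ clean_text
  let cues := PySem.List.sorted
    ((PySem.Set.ofList cue_word_indices).filter (fun i => 0 < i && i < (words.length : Int)))
    (fun x => x) false
  let st := cues.foldl
    (fun (st : List String × Int) idx =>
      (st.1 ++ PySem.List.slice words (some st.2) (some idx) ++ ["[CUE]"], idx)) ([], 0)
  PySem.Str.join " " (st.1 ++ PySem.List.slice words (some st.2) none)

-- ===== PRECONDITION & SPEC =====
def Spec_inject_cues (clean_text : String) (cue_word_indices : List Int) (out : String) : Prop := out = inject_cues_alt clean_text cue_word_indices
instance (clean_text : String) (cue_word_indices : List Int) (out : String) : Decidable (Spec_inject_cues clean_text cue_word_indices out) := by unfold Spec_inject_cues; infer_instance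

-- ===== CLAIM (what is proved, stated in full; the proofs are below) =====
def Claim_equal_inject_cues : Prop := ∀ (clean_text : String) (cue_word_indices : List Int), Dom_inject_cues clean_text cue_word_indices → Spec_inject_cues clean_text cue_word_indices (inject_cues clean_text cue_word_indices)

-- ===== LEMMAS AND PROOFS =====

-- token stream of A's scan, starting at word position p
def pvToks (words : List String) (mem : Int → Bool) (p : Nat) : List String :=
  (PySem.List.enumerate (words.drop p) (p : Int)).flatMap
    (fun iw => if mem iw.1 then ["[CUE]", iw.2] else [iw.2])

theorem pvToks_skip (words : List String) (mem : Int → Bool) :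
    ∀ (k p : Nat), (∀ i : Nat, p ≤ i → i < p + k → mem (i : Int) = false) →
    pvToks words mem p = (words.drop p).take k ++ pvToks words mem (p + k) := by
  intro k
  induction k with
  | zero => intro p _; simp
  | succ k ih =>
    intro p h
    by_cases hp : p < words.length
    · have hd : words.drop p = words[p] :: words.drop (p + 1) :=
        List.drop_eq_getElem_cons hp
      have hmem : mem (p : Int) = false := h p le_rfl (by omega)
      have hstep : pvToks words mem p = words[p] :: pvToks words mem (p + 1) := by
        unfold pvToks
        rw [hd, PySem.List.enumerate_cons]
        simp [hmem]
      rw [hstep, ih (p + 1) (by intro i h1 h2; exact h i (by omega) (by omega)), hd,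
        List.take_succ_cons, show p + (k + 1) = p + 1 + k by omega]
      simp
    · have hd : words.drop p = [] := List.drop_eq_nil_of_le (by omega)
      have hd2 : words.drop (p + (k + 1)) = [] := List.drop_eq_nil_of_le (by omega)
      unfold pvToks
      rw [hd, hd2]
      simp

theorem pvToks_tail (words : List String) (mem : Int → Bool) (p : Nat)
    (h : ∀ i : Nat, p ≤ i → i < words.length → mem (i : Int) = false) :
    pvToks words mem p = words.drop p := by
  by_cases hp : p ≤ words.length
  · rw [pvToks_skip words mem (words.length - p) p
      (by intro i h1 h2; exact h i h1 (by omega))]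
    have hk : p + (words.length - p) = words.length := by omega
    have hnil : words.drop words.length = [] := List.drop_eq_nil_of_le le_rfl
    rw [hk]
    unfold pvToks
    rw [hnil]
    simp
  · have hd : words.drop p = [] := List.drop_eq_nil_of_le (by omega)
    unfold pvToks; rw [hd]; simp

theorem pvToks_cue (words : List String) (mem : Int → Bool) (p : Nat)
    (hp : p < words.length) (hm : mem (p : Int) = true) :
    pvToks words mem p = "[CUE]" :: words[p] :: pvToks words mem (p + 1) := by
  have hd : words.drop p = words[p] :: words.drop (p + 1) :=
    List.drop_eq_getElem_cons hp
  unfold pvToks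
  rw [hd, PySem.List.enumerate_cons]
  simp [hm]

theorem pvLoop_eq (words : List String) (mem : Int → Bool) :
    ∀ (cues : List Int) (parts : List String) (p : Nat),
    cues.Pairwise (· < ·) →
    (∀ c ∈ cues, (p : Int) < c ∧ c < (words.length : Int)) →
    (∀ i : Nat, p < i → i < words.length → (mem (i : Int) = decide ((i : Int) ∈ cues))) →
    (cues.foldl
        (fun (st : List String × Int) idx =>
          (st.1 ++ PySem.List.slice words (some st.2) (some idx) ++ ["[CUE]"], idx)) (parts, (p : Int))).1
      ++ PySem.List.slice words (some ((cues.foldl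
        (fun (st : List String × Int) idx =>
          (st.1 ++ PySem.List.slice words (some st.2) (some idx) ++ ["[CUE]"], idx)) (parts, (p : Int))).2)) none
    = parts ++ (words.drop p).take 1 ++ pvToks words mem (p + 1) := by
  intro cues
  induction cues with
  | nil =>
    intro parts p _ _ hmem
    simp only [List.foldl_nil]
    rw [PySem.List.slice_from_natCast]
    rw [pvToks_tail words mem (p + 1)
      (by intro i h1 h2; rw [hmem i (by omega) h2]; simp)]
    have : (words.drop p).take 1 ++ words.drop (p + 1) = words.drop p := by
      rw [show words.drop (p+1) = (words.drop p).drop 1 by rw [List.drop_drop]]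
      exact List.take_append_drop 1 (words.drop p)
    simp [this]
  | cons c cs ih =>
    intro parts p hpw hrange hmem
    obtain ⟨hpc, hclen⟩ := hrange c (List.mem_cons_self)
    have hc0 : (0:Int) < c := lt_of_le_of_lt (Int.natCast_nonneg p) hpc
    have hcast : ((c.toNat : Nat) : Int) = c := Int.toNat_of_nonneg (le_of_lt hc0)
    have hpcN : p < c.toNat := by omega
    have hcNlen : c.toNat < words.length := by omega
    have hplen : p < words.length := by omega
    have hdp : words.drop p = words[p] :: words.drop (p + 1) := List.drop_eq_getElem_cons hplen
    have hdc : words.drop c.toNat = words[c.toNat] :: words.drop (c.toNat + 1) :=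
      List.drop_eq_getElem_cons hcNlen
    have hpair := List.pairwise_cons.mp hpw
    -- one step of the fold
    simp only [List.foldl_cons]
    rw [show c = ((c.toNat : Nat) : Int) from hcast.symm]
    rw [PySem.List.slice_natCast]
    rw [ih (parts ++ (words.drop p).take (c.toNat - p) ++ ["[CUE]"]) c.toNat hpair.2
      (by intro x hx; have h2 := (hrange x (List.mem_cons_of_mem c hx)).2
          exact ⟨by rw [hcast]; exact hpair.1 x hx, h2⟩)
      (by intro i h1 h2
          rw [hmem i (by omega) h2]
          apply decide_eq_decide.mpr
          rw [List.mem_cons]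
          constructor
          · rintro (h | h)
            · exfalso; omega
            · exact h
          · exact Or.inr)]
    -- now rewrite the RHS token stream
    have hmemc : mem ((c.toNat : Nat) : Int) = true := by
      rw [hmem c.toNat (by omega) hcNlen, hcast]; simp
    rw [pvToks_skip words mem (c.toNat - 1 - p) (p + 1)
      (by intro i h1 h2
          rw [hmem i (by omega) (by omega)]
          simp only [List.mem_cons, decide_eq_false_iff_not, not_or]
          constructor
          · intro hic; omega
          · intro hics; have := hpair.1 _ hics; omega)]
    rw [show p + 1 + (c.toNat - 1 - p) = c.toNat by omega]
    rw [pvToks_cue words mem c.toNat hcNlen hmemc]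
    rw [hdc, hdp]
    simp only [List.take_succ_cons, List.take_zero]
    rw [show c.toNat - p = (c.toNat - 1 - p) + 1 by omega]
    rw [List.take_succ_cons]
    simp

theorem inject_cues_eq (clean_text : String) (cue_word_indices : List Int) :
    inject_cues clean_text cue_word_indices = inject_cues_alt clean_text cue_word_indices := by
  unfold inject_cues inject_cues_alt
  simp only []
  set words := PySem.Str.split₀ clean_text with hw
  set cue_set := (PySem.Set.ofList cue_word_indices).diff (PySem.Set.ofList [0]) with hcs
  set memA : Int → Bool := fun i => cue_set.contains i with hmA
  set cues := PySem.List.sorted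
    ((PySem.Set.ofList cue_word_indices).filter (fun i => 0 < i && i < (words.length : Int)))
    (fun x => x) false with hcues
  -- A's token list is pvToks at 0
  have hA : (PySem.List.enumerate words).foldl
      (fun acc iw => (if cue_set.contains iw.1 then acc ++ ["[CUE]"] else acc) ++ [iw.2])
      ([] : List String) = pvToks words memA 0 := by
    have hstep : (fun (acc : List String) (iw : Int × String) =>
        (if cue_set.contains iw.1 then acc ++ ["[CUE]"] else acc) ++ [iw.2])
        = (fun acc iw => acc ++ (if memA iw.1 then ["[CUE]", iw.2] else [iw.2])) := by
      funext acc iw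
      by_cases h : iw.1 ∈ cue_set <;> simp [hmA, h]
    rw [hstep, PySem.List.foldl_append_eq_flatMap]
    simp [pvToks]
  -- membership of the sorted cue list
  have hmemcues : ∀ x : Int, x ∈ cues ↔ (x ∈ cue_word_indices ∧ 0 < x ∧ x < (words.length : Int)) := by
    intro x
    rw [hcues, PySem.List.mem_sorted, List.mem_filter, PySem.Set.mem_ofList]
    simp
  have hpw : cues.Pairwise (· < ·) := by
    have hle : cues.Pairwise (· ≤ ·) := PySem.List.sorted_pairwise _ _
    have hnd : cues.Nodup :=
      (PySem.List.sorted_perm _ _ _).symm.nodup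
        ((PySem.Set.nodup_ofList cue_word_indices).filter _)
    exact (hle.and hnd).imp (fun h => lt_of_le_of_ne h.1 h.2)
  have hmem0 : memA 0 = false := by
    rw [hmA]
    simp only [Bool.eq_false_iff, ne_eq]
    intro h
    rw [PySem.Set.contains_iff, hcs, PySem.Set.mem_diff] at h
    exact h.2 (by rw [PySem.Set.mem_ofList]; simp)
  have hB := pvLoop_eq words memA cues [] 0 hpw
    (by intro c hc
        have := (hmemcues c).mp hc
        exact ⟨by exact_mod_cast this.2.1, this.2.2⟩)
    (by intro i h1 h2
        rw [Bool.eq_iff_iff, hmA]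
        simp only [PySem.Set.contains_iff, hcs, PySem.Set.mem_diff, PySem.Set.mem_ofList,
          decide_eq_true_iff]
        rw [hmemcues]
        constructor
        · rintro ⟨hm, hne⟩
          exact ⟨hm, by exact_mod_cast Nat.pos_of_ne_zero (by rintro rfl; exact hne (by simp)),
            by exact_mod_cast h2⟩
        · rintro ⟨hm, hpos, _⟩
          refine ⟨hm, ?_⟩
          simp only [List.mem_cons, List.not_mem_nil, or_false]
          intro h0; rw [h0] at hpos; exact absurd hpos (by simp))
  have hA0 : pvToks words memA 0 = (words.drop 0).take 1 ++ pvToks words memA 1 := by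
    have hz := pvToks_skip words memA 1 0 (by
      intro i h1 h2
      have hi0 : i = 0 := by omega
      subst hi0; exact_mod_cast hmem0)
    simpa using hz
  simp only [Nat.cast_zero, List.nil_append, List.drop_zero, Nat.zero_add] at hB
  simp only [hA, hA0, List.drop_zero]
  rw [hB]

-- ===== VERDICT (by name: the statement is the Claim_ definition above) =====
theorem inject_cues_spec : Claim_equal_inject_cues := by
  intro clean_text cue_word_indices _
  unfold Spec_inject_cues
  exact inject_cues_eq clean_text cue_word_indices
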